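-- pv_equiv track=rewrite | github.com/posl/comment_recommendation | script/split_gen/3_time/en/128_D/9.py | max_jewel_value
-- ===== SOURCE A (Python) =====
-- def max_jewel_value(N, K, V):
--     max_value = 0
--     for i in range(min(K, N)+1):
--         for j in range(min(K-i, N-i)+1):
--             if i+j > N:
--                 break
--             temp = V[:i] + V[N-j:]
--             temp.sort()
--             for k in range(min(K-i-j, len(temp))):
--                 if temp[k] < 0:
--                     temp[k] = 0
--             max_value = max(max_value, sum(temp))
--     return max_value
-- ===== SOURCE B (Python) =====
-- def max_jewel_value(N, K, V):
--     # Incremental: grow the prefix across i and the suffix across j, maintaining a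
--     # running total and an insertion-sorted list of negatives, instead of
--     # rebuilding and sorting the whole hand for every (i, j) pair.
--     L = len(V)
--     M = min(K, N)
--     best = 0
--     ptotal = 0
--     pnegs = []          # ascending negatives of V[:i]
--     for i in range(M + 1):
--         total = ptotal
--         negs = pnegs[:]
--         cur = L         # clamped start index of the current suffix slice
--         for j in range(M - i + 1):
--             ns = N - j
--             if ns > L:
--                 ns = L
--             for idx in range(ns, cur):
--                 x = V[idx]
--                 total += x
--                 if x < 0:
--                     p = 0
--                     while p < len(negs) and negs[p] <= x:
--                         p += 1
--                     negs.insert(p, x)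
--             cur = ns
--             best = max(best, total - sum(negs[:K - i - j]))
--         if i < L:
--             x = V[i]
--             ptotal += x
--             if x < 0:
--                 p = 0
--                 while p < len(pnegs) and pnegs[p] <= x:
--                     p += 1
--                 pnegs.insert(p, x)
--     return best
-- ===== Notes on version B (the rewrite author's own statement) =====
-- stated objective: alternative
-- what changed: Instead of rebuilding the hand and sorting it for every (i,j) pair, B maintains incremental state: the prefix sum and its insertion-sorted negatives grow once per i across the outer loop, and for each i the suffix grows one clamped slice step per j, inserting each new element into the sorted negatives list and keeping a running total, so no per-pair slicing or full sort ever happens; the per-pair value is total minus the sum of the K-i-j smallest negatives.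
import Mathlib
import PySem

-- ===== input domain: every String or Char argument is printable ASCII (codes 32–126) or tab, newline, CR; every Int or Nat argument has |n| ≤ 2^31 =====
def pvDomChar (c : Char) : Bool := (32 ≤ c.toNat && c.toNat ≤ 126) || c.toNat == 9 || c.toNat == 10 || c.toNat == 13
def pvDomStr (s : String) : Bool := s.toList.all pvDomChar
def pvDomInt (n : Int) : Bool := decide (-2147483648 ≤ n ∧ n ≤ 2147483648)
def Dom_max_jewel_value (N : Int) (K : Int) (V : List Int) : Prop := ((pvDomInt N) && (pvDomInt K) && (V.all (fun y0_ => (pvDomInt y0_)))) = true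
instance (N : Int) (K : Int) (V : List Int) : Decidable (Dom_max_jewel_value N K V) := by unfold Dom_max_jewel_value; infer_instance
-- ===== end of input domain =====

-- B replaces A's rebuild-and-sort of the whole hand at every (i,j) pair by an incremental
-- scheme: the prefix grows across i and the suffix across j, with a running total and an
-- insertion-sorted list of the negatives maintained across iterations (objective: alternative).

-- ===== PORT A =====
-- for k in range(min(K-i-j, len(temp))): if temp[k] < 0: temp[k] = 0   (indices always in range)
def pvZeroA (t : List Int) (r : Int) : List Int :=
  (PySem.List.pyRange 0 (min r (t.length : Int)) 1).foldl
    (fun l k => if PySem.List.pyGetD l k 0 < 0 then PySem.List.pySetD l k 0 else l) t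

-- the inner j-loop of A, with Python's `break` as early return
def pvInnerA (N K : Int) (V : List Int) (i : Int) : List Int → Int → Int
  | [], mv => mv
  | j :: js, mv =>
    if i + j > N then mv
    else
      let temp := PySem.List.sorted
        (PySem.List.slice V none (some i) ++ PySem.List.slice V (some (N - j)) none)
        (fun x => x) false
      pvInnerA N K V i js (max mv (pvZeroA temp (K - i - j)).sum)

def max_jewel_value (N : Int) (K : Int) (V : List Int) : Int :=
  (PySem.List.pyRange 0 (min K N + 1) 1).foldl
    (fun mv i => pvInnerA N K V i (PySem.List.pyRange 0 (min (K - i) (N - i) + 1) 1) mv) 0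

-- ===== PORT B =====
-- `p = 0; while p < len(negs) and negs[p] <= x: p += 1; negs.insert(p, x)`
def pvInsert (x : Int) : List Int → List Int
  | [] => [x]
  | y :: ys => if y ≤ x then y :: pvInsert x ys else x :: y :: ys

-- loop body `x = V[idx]; total += x; if x < 0: <insert x into negs>` on state (total, negs)
def pvStepB (tn : Int × List Int) (x : Int) : Int × List Int :=
  (tn.1 + x, if x < 0 then pvInsert x tn.2 else tn.2)

def max_jewel_value_alt (N : Int) (K : Int) (V : List Int) : Int :=
  let L : Int := (V.length : Int)
  let M := min K N
  let st := (PySem.List.pyRange 0 (M + 1) 1).foldl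
    (fun (st : Int × Int × List Int) i =>        -- (best, ptotal, pnegs)
      let inner := (PySem.List.pyRange 0 (M - i + 1) 1).foldl
        (fun (s : Int × Int × List Int × Int) j =>  -- (best, total, negs, cur)
          let ns := if N - j > L then L else N - j
          let tn := (PySem.List.pyRange ns s.2.2.2 1).foldl
            (fun tn idx => pvStepB tn (PySem.List.pyGetD V idx 0)) (s.2.1, s.2.2.1)
          (max s.1 (tn.1 - (PySem.List.slice tn.2 none (some (K - i - j))).sum), tn.1, tn.2, ns))
        (st.1, st.2.1, st.2.2, L)
      if i < L then
        let x := PySem.List.pyGetD V i 0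
        (inner.1, st.2.1 + x, if x < 0 then pvInsert x st.2.2 else st.2.2)
      else (inner.1, st.2.1, st.2.2))
    (0, 0, ([] : List Int))
  st.1

-- ===== PRECONDITION & SPEC =====
def Spec_max_jewel_value (N : Int) (K : Int) (V : List Int) (out : Int) : Prop := out = max_jewel_value_alt N K V
instance (N : Int) (K : Int) (V : List Int) (out : Int) : Decidable (Spec_max_jewel_value N K V out) := by unfold Spec_max_jewel_value; infer_instance

-- ===== CLAIM (what is proved, stated in full; the proofs are below) =====
def Claim_equal_max_jewel_value : Prop := ∀ (N : Int) (K : Int) (V : List Int), Dom_max_jewel_value N K V → Spec_max_jewel_value N K V (max_jewel_value N K V)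

-- ===== LEMMAS AND PROOFS =====

-- proof-side intermediate form: A's loops with the per-pair value expressed arithmetically
def pvSpecFold (N K : Int) (V : List Int) : Int :=
  let M := min K N
  (PySem.List.pyRange 0 (M + 1) 1).foldl
    (fun best i =>
      (PySem.List.pyRange 0 (M - i + 1) 1).foldl
        (fun best j =>
          let hand := PySem.List.slice V none (some i) ++ PySem.List.slice V (some (N - j)) none
          let negs := PySem.List.sorted (hand.filter (fun x => decide (x < 0))) (fun x => x) false
          max best (hand.sum - (PySem.List.slice negs none (some (K - i - j))).sum))
        best)
    0

-- ---------- part 1: A = pvSpecFold ----------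

-- sum of clamping at 0 = sum minus the negatives
lemma sum_map_max_zero (l : List Int) :
    (l.map (fun v => max v 0)).sum = l.sum - (l.filter (fun x => decide (x < 0))).sum := by
  induction l with
  | nil => simp
  | cons x xs ih =>
    by_cases hx : x < 0 <;> simp [hx, ih] <;> omega

-- setting position A.length in A ++ x :: D
lemma set_append_cons {α : Type} (A D : List α) (x v : α) (n : Nat) (hn : n = A.length) :
    (A ++ x :: D).set n v = A ++ v :: D := by
  subst hn
  rw [List.set_append_right _ _ (le_refl _)]
  simp

-- the zeroing loop, characterised: it clamps the first m entries at 0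
lemma zero_fold_eq (t : List Int) (m : Nat) (hm : m ≤ t.length) :
    (((List.range m).map (fun (k : Nat) => (k : Int))).foldl
      (fun l k => if PySem.List.pyGetD l k 0 < 0 then PySem.List.pySetD l k 0 else l) t)
    = (t.take m).map (fun v => max v 0) ++ t.drop m := by
  induction m with
  | zero => simp
  | succ m ih =>
    have hmlt : m < t.length := hm
    have ih' := ih (Nat.le_of_lt hmlt)
    rw [List.range_succ, List.map_append, List.foldl_append, ih']
    have hlen : ((t.take m).map (fun v => max v 0)).length = m := by
      simp [Nat.min_eq_left (Nat.le_of_lt hmlt)]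
    have hget : PySem.List.pyGetD ((t.take m).map (fun v => max v 0) ++ t.drop m) (m : Int) 0 = t[m] := by
      rw [PySem.List.pyGetD_natCast]
      rw [List.getD_eq_getElem?_getD, List.getElem?_append_right (by omega)]
      rw [List.getElem?_drop]
      have : ((t.take m).map (fun v => max v 0)).length = m := hlen
      rw [this]
      have h2 : m + (m - m) = m := by omega
      rw [h2, List.getElem?_eq_getElem hmlt]
      rfl
    have hdrop : t.drop m = t[m] :: t.drop (m + 1) := List.drop_eq_getElem_cons hmlt
    have htake : t.take (m + 1) = t.take m ++ [t[m]] := by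
      rw [List.take_add_one, List.getElem?_eq_getElem hmlt]; rfl
    simp only [List.map_cons, List.map_nil, List.foldl_cons, List.foldl_nil, hget]
    by_cases hneg : t[m] < 0
    · rw [if_pos hneg, PySem.List.pySetD_natCast]
      rw [hdrop, htake, List.map_append, set_append_cons _ _ _ _ _ hlen.symm]
      have h0 : max t[m] 0 = 0 := by omega
      simp [h0]
    · rw [if_neg hneg]
      rw [hdrop, htake, List.map_append]
      have h0 : max t[m] 0 = t[m] := by omega
      simp [h0]

-- in a sorted list, taking then filtering negatives = filtering then taking
lemma take_filter_sorted (t : List Int) (ht : t.Pairwise (· ≤ ·)) (n : Nat) :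
    (t.take n).filter (fun x => decide (x < 0)) = (t.filter (fun x => decide (x < 0))).take n := by
  induction t generalizing n with
  | nil => simp
  | cons x xs ih =>
    have hx := (List.pairwise_cons.mp ht).1
    have hxs := (List.pairwise_cons.mp ht).2
    cases n with
    | zero => simp
    | succ n =>
      by_cases hneg : x < 0
      · simp [hneg, ih hxs]
      · have hnil : xs.filter (fun x => decide (x < 0)) = [] := by
          rw [List.filter_eq_nil_iff]
          intro y hy
          simp only [decide_eq_true_eq]
          have := hx y hy
          omega
        have hnil2 : (xs.take n).filter (fun x => decide (x < 0)) = [] := by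
          rw [List.filter_eq_nil_iff]
          intro y hy
          have : y ∈ xs := List.mem_of_mem_take hy
          simp only [decide_eq_true_eq]
          have := hx y this
          omega
        simp [hneg, hnil, hnil2]

-- sorted negatives of a list = negatives of its sorted version
lemma sorted_filter_neg (hand : List Int) :
    PySem.List.sorted (hand.filter (fun x => decide (x < 0))) (fun x => x) false
      = (PySem.List.sorted hand (fun x => x) false).filter (fun x => decide (x < 0)) := by
  apply PySem.List.sorted_id_eq_of_perm_of_pairwise
  · exact (PySem.List.sorted_perm hand (fun x => x) false).filter _
  · exact List.Pairwise.filter _ (PySem.List.sorted_pairwise hand (fun x => x))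

-- the per-pair values agree
lemma pair_value_eq (hand : List Int) (r : Int) (hr : 0 ≤ r) :
    (pvZeroA (PySem.List.sorted hand (fun x => x) false) r).sum
      = hand.sum -
        (PySem.List.slice (PySem.List.sorted (hand.filter (fun x => decide (x < 0))) (fun x => x) false)
          none (some r)).sum := by
  have hperm : (PySem.List.sorted hand (fun x => x) false).Perm hand :=
    PySem.List.sorted_perm hand (fun x => x) false
  have hsorted : (PySem.List.sorted hand (fun x => x) false).Pairwise (· ≤ ·) :=
    PySem.List.sorted_pairwise hand (fun x => x)
  rw [sorted_filter_neg, PySem.List.slice_to _ hr]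
  generalize ht : PySem.List.sorted hand (fun x => x) false = t at hperm hsorted ⊢
  have hsum : hand.sum = t.sum := (hperm.sum_eq).symm
  rw [hsum]
  have hmin : (0:Int) ≤ min r (t.length : Int) := le_min hr (by positivity)
  have hrange : PySem.List.pyRange 0 (min r (t.length : Int)) 1
      = (List.range (min r (t.length : Int)).toNat).map (fun (k : Nat) => (k : Int)) := by
    rw [PySem.List.pyRange_one]; simp only [sub_zero, zero_add]
  have hle : (min r (t.length : Int)).toNat ≤ t.length := by omega
  have hz : pvZeroA t r = (t.take (min r (t.length : Int)).toNat).map (fun v => max v 0)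
      ++ t.drop (min r (t.length : Int)).toNat := by
    rw [pvZeroA, hrange]
    exact zero_fold_eq t _ hle
  rw [hz]
  rw [List.sum_append, sum_map_max_zero]
  have htake : t.take (min r (t.length : Int)).toNat = t.take r.toNat := by
    by_cases h : r ≤ (t.length : Int)
    · congr 1; omega
    · have h1 : (min r (t.length : Int)).toNat = t.length := by omega
      rw [h1, List.take_length, List.take_of_length_le (by omega)]
  rw [htake, take_filter_sorted t hsorted]
  have hsplit : (t.take r.toNat).sum + (t.drop r.toNat).sum = t.sum := by
    rw [← List.sum_append, List.take_append_drop]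
  have hsplit2 : (t.take (min r (t.length : Int)).toNat).sum + (t.drop (min r (t.length : Int)).toNat).sum = t.sum := by
    rw [← List.sum_append, List.take_append_drop]
  rw [htake] at hsplit2
  omega

-- the inner loop of A equals the spec's inner fold, given every j keeps i+j ≤ N and r ≥ 0
lemma innerA_eq (N K : Int) (V : List Int) (i : Int) (js : List Int) (mv : Int)
    (hj : ∀ j ∈ js, i + j ≤ N ∧ 0 ≤ K - i - j) :
    pvInnerA N K V i js mv
      = js.foldl (fun best j =>
          let hand := PySem.List.slice V none (some i) ++ PySem.List.slice V (some (N - j)) none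
          let negs := PySem.List.sorted (hand.filter (fun x => decide (x < 0))) (fun x => x) false
          max best (hand.sum - (PySem.List.slice negs none (some (K - i - j))).sum)) mv := by
  induction js generalizing mv with
  | nil => simp [pvInnerA]
  | cons j js ih =>
    have hjh := hj j (List.mem_cons_self)
    rw [pvInnerA, if_neg (by omega)]
    rw [List.foldl_cons, ih _ (fun j hjm => hj j (List.mem_cons_of_mem _ hjm))]
    congr 1
    simp only []
    rw [pair_value_eq _ _ hjh.2]

theorem max_jewel_value_eq_spec (N K : Int) (V : List Int) :
    max_jewel_value N K V = pvSpecFold N K V := by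
  rw [max_jewel_value, pvSpecFold]
  apply PySem.List.foldl_congr_mem
  intro mv i hi
  have hi' : 0 ≤ i ∧ i ≤ min K N := by
    have := (PySem.List.mem_pyRange_one).mp hi
    omega
  have hmin : min (K - i) (N - i) = min K N - i := by omega
  rw [hmin]
  rw [innerA_eq]
  intro j hjm
  have := (PySem.List.mem_pyRange_one).mp hjm
  omega

-- ---------- part 2: pvSpecFold = max_jewel_value_alt ----------

def pvFneg (l : List Int) : List Int := l.filter (fun x => decide (x < 0))

lemma pvFneg_append (a b : List Int) : pvFneg (a ++ b) = pvFneg a ++ pvFneg b := by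
  simp [pvFneg, List.filter_append]

lemma pvFneg_singleton_neg (x : Int) (h : x < 0) : pvFneg [x] = [x] := by
  simp [pvFneg, h]

lemma pvFneg_singleton_nonneg (x : Int) (h : ¬ x < 0) : pvFneg [x] = [] := by
  simp [pvFneg, h]

lemma pvInsert_perm (x : Int) (l : List Int) : (pvInsert x l).Perm (x :: l) := by
  induction l with
  | nil => simp [pvInsert]
  | cons y ys ih =>
    rw [pvInsert]
    split_ifs with h
    · exact (ih.cons y).trans (List.Perm.swap x y ys)
    · exact List.Perm.refl _

lemma pvInsert_pairwise (x : Int) (l : List Int) (h : l.Pairwise (· ≤ ·)) :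
    (pvInsert x l).Pairwise (· ≤ ·) := by
  induction l with
  | nil => simp [pvInsert]
  | cons y ys ih =>
    have hy := (List.pairwise_cons.mp h).1
    have hys := (List.pairwise_cons.mp h).2
    rw [pvInsert]
    split_ifs with hle
    · refine List.pairwise_cons.mpr ⟨?_, ih hys⟩
      intro z hz
      rcases List.mem_cons.mp ((pvInsert_perm x ys).mem_iff.mp hz) with rfl | hz'
      · exact hle
      · exact hy z hz'
    · refine List.pairwise_cons.mpr ⟨?_, h⟩
      intro z hz
      rcases List.mem_cons.mp hz with rfl | hz'
      · omega
      · have := hy z hz'; omega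

lemma foldB_fst (l : List Int) (tn : Int × List Int) :
    (l.foldl pvStepB tn).1 = tn.1 + l.sum := by
  induction l generalizing tn with
  | nil => simp
  | cons x xs ih => simp [pvStepB, ih]; ring

lemma foldB_snd_perm (l : List Int) (tn : Int × List Int) :
    (l.foldl pvStepB tn).2.Perm (tn.2 ++ pvFneg l) := by
  induction l generalizing tn with
  | nil => simp [pvFneg]
  | cons x xs ih =>
    rw [List.foldl_cons]
    refine (ih _).trans ?_
    have hstep : (pvStepB tn x).2 = (if x < 0 then pvInsert x tn.2 else tn.2) := rfl
    by_cases hx : x < 0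
    · have h1 : pvFneg (x :: xs) = x :: pvFneg xs := by simp [pvFneg, hx]
      rw [hstep, if_pos hx, h1]
      refine ((pvInsert_perm x tn.2).append_right _).trans ?_
      exact (List.perm_middle (a := x) (l₁ := tn.2) (l₂ := pvFneg xs)).symm
    · have h1 : pvFneg (x :: xs) = pvFneg xs := by simp [pvFneg, hx]
      rw [hstep, if_neg hx, h1]

lemma foldB_snd_pairwise (l : List Int) (tn : Int × List Int) (h : tn.2.Pairwise (· ≤ ·)) :
    (l.foldl pvStepB tn).2.Pairwise (· ≤ ·) := by
  induction l generalizing tn with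
  | nil => exact h
  | cons x xs ih =>
    rw [List.foldl_cons]
    apply ih
    by_cases hx : x < 0 <;> simp [pvStepB, hx]
    · exact pvInsert_pairwise x tn.2 h
    · exact h

-- the index loop over [a, b) folds pvStepB over the segment of V
lemma fold_idx_eq (V : List Int) (a b : Int) (ha : 0 ≤ a) (hb : b ≤ (V.length : Int))
    (tn : Int × List Int) :
    (PySem.List.pyRange a b 1).foldl (fun tn idx => pvStepB tn (PySem.List.pyGetD V idx 0)) tn
      = ((V.take b.toNat).drop a.toNat).foldl pvStepB tn := by
  by_cases hab : b ≤ a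
  · rw [PySem.List.pyRange_one_eq_nil hab, List.drop_eq_nil_of_le (by simp only [List.length_take]; omega)]
    rfl
  · push_neg at hab
    have hn : ∃ n : Nat, (b - a).toNat = n := ⟨_, rfl⟩
    obtain ⟨n, hn⟩ := hn
    induction n generalizing a tn with
    | zero => omega
    | succ n ih =>
      rw [PySem.List.pyRange_one_cons hab, List.foldl_cons]
      have haV : a.toNat < V.length := by omega
      have ha' : a = ((a.toNat : Nat) : Int) := by omega
      have hget : PySem.List.pyGetD V a 0 = V[a.toNat] := by
        conv_lhs => rw [ha']
        rw [PySem.List.pyGetD_natCast, List.getD_eq_getElem?_getD,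
          List.getElem?_eq_getElem haV]
        rfl
      have hseg : (V.take b.toNat).drop a.toNat = V[a.toNat] :: (V.take b.toNat).drop (a.toNat + 1) := by
        have hlt : a.toNat < (V.take b.toNat).length := by simp; omega
        rw [List.drop_eq_getElem_cons hlt]
        congr 1
        rw [List.getElem_take]
      rw [hseg, List.foldl_cons, hget]
      by_cases hab2 : b ≤ a + 1
      · have hb2 : b = a + 1 := by omega
        rw [hb2, PySem.List.pyRange_one_eq_nil (le_refl _), List.foldl_nil,
          List.drop_eq_nil_of_le (by simp only [List.length_take]; omega)]
        rfl
      · push_neg at hab2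
        have h1 : (a + 1).toNat = a.toNat + 1 := by omega
        have := ih (a + 1) (by omega) (pvStepB tn V[a.toNat]) hab2 (by omega)
        rw [this, h1]

-- drop past an over-long index equals drop at the clamp
lemma drop_min_clamp (V : List Int) (m : Int) (hm : 0 ≤ m) :
    V.drop m.toNat = V.drop (min m (V.length : Int)).toNat := by
  by_cases h : m ≤ (V.length : Int)
  · rw [min_eq_left h]
  · rw [min_eq_right (by omega), List.drop_eq_nil_of_le (by omega),
      List.drop_eq_nil_of_le (by omega)]

-- splitting a drop at a nearer cut
lemma drop_split (V : List Int) (a b : Nat) (hab : a ≤ b) (hb : b ≤ V.length) :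
    V.drop a = (V.take b).drop a ++ V.drop b := by
  conv_lhs => rw [← List.take_append_drop b V]
  rw [List.drop_append_of_le_length (by simp only [List.length_take]; omega)]

-- B's inner fold computes the spec's inner fold
lemma innerB_eq (N K : Int) (V : List Int) (i : Int) (hi : 0 ≤ i)
    (js : List Int) (b total : Int) (negs : List Int) (cur : Int)
    (hcur0 : 0 ≤ cur) (hcurL : cur ≤ (V.length : Int))
    (hjs : ∀ j ∈ js, 0 ≤ j ∧ j ≤ N ∧ min (N - j) (V.length : Int) ≤ cur ∧ 0 ≤ K - i - j)
    (hsort : js.Pairwise (· ≤ ·))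
    (htotal : total = (V.take i.toNat).sum + (V.drop cur.toNat).sum)
    (hperm : negs.Perm (pvFneg (V.take i.toNat ++ V.drop cur.toNat)))
    (hpair : negs.Pairwise (· ≤ ·)) :
    (js.foldl
      (fun (s : Int × Int × List Int × Int) j =>
        let ns := if N - j > (V.length : Int) then (V.length : Int) else N - j
        let tn := (PySem.List.pyRange ns s.2.2.2 1).foldl
          (fun tn idx => pvStepB tn (PySem.List.pyGetD V idx 0)) (s.2.1, s.2.2.1)
        (max s.1 (tn.1 - (PySem.List.slice tn.2 none (some (K - i - j))).sum), tn.1, tn.2, ns))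
      (b, total, negs, cur)).1
    = js.foldl (fun best j =>
        let hand := PySem.List.slice V none (some i) ++ PySem.List.slice V (some (N - j)) none
        let negs := PySem.List.sorted (hand.filter (fun x => decide (x < 0))) (fun x => x) false
        max best (hand.sum - (PySem.List.slice negs none (some (K - i - j))).sum)) b := by
  induction js generalizing b total negs cur with
  | nil => rfl
  | cons j js ih =>
    obtain ⟨hj0, hjN, hjcur, hjr⟩ := hjs j (List.mem_cons_self)
    have hjs' := fun j hj => hjs j (List.mem_cons_of_mem _ hj)
    have hhead := (List.pairwise_cons.mp hsort).1
    have hsort' := (List.pairwise_cons.mp hsort).2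
    simp only [List.foldl_cons]
    set L : Int := (V.length : Int) with hL
    have hns : (if N - j > L then L else N - j) = min (N - j) L := by
      split_ifs with h
      · omega
      · omega
    have hns0 : 0 ≤ min (N - j) L := le_min (by omega) (by positivity)
    have hnsL : min (N - j) L ≤ L := min_le_right _ _
    -- the segment fold
    rw [hns, fold_idx_eq V _ cur hns0 hcurL]
    set ns := min (N - j) L with hnsdef
    set seg := (V.take cur.toNat).drop ns.toNat with hseg
    have hsplit : V.drop ns.toNat = seg ++ V.drop cur.toNat := by
      rw [hseg]
      exact drop_split V ns.toNat cur.toNat (by omega) (by omega)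
    have htn1 : ((seg.foldl pvStepB (total, negs)).1)
        = (V.take i.toNat).sum + (V.drop ns.toNat).sum := by
      rw [foldB_fst, htotal, hsplit, List.sum_append]; ring
    have htn2perm : (seg.foldl pvStepB (total, negs)).2.Perm
        (pvFneg (V.take i.toNat ++ V.drop ns.toNat)) := by
      refine (foldB_snd_perm seg (total, negs)).trans ?_
      have h1 : pvFneg (V.take i.toNat ++ V.drop ns.toNat)
          = pvFneg (V.take i.toNat) ++ (pvFneg seg ++ pvFneg (V.drop cur.toNat)) := by
        rw [hsplit]; simp [pvFneg, List.filter_append]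
      have h2 : pvFneg (V.take i.toNat ++ V.drop cur.toNat)
          = pvFneg (V.take i.toNat) ++ pvFneg (V.drop cur.toNat) := by
        simp [pvFneg, List.filter_append]
      rw [h1]
      refine (hperm.append_right (pvFneg seg)).trans ?_
      rw [h2, List.append_assoc]
      exact List.Perm.append_left _ List.perm_append_comm
    have htn2pair : (seg.foldl pvStepB (total, negs)).2.Pairwise (· ≤ ·) :=
      foldB_snd_pairwise seg (total, negs) hpair
    -- the per-pair value
    have hhand : PySem.List.slice V none (some i) ++ PySem.List.slice V (some (N - j)) none
        = V.take i.toNat ++ V.drop ns.toNat := by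
      rw [PySem.List.slice_to _ hi, PySem.List.slice_from _ (by omega)]
      rw [drop_min_clamp V (N - j) (by omega)]
    have hSN : PySem.List.sorted (pvFneg (V.take i.toNat ++ V.drop ns.toNat)) (fun x => x) false
        = (seg.foldl pvStepB (total, negs)).2 :=
      PySem.List.sorted_id_eq_of_perm_of_pairwise _ _ htn2perm htn2pair
    have hval : (seg.foldl pvStepB (total, negs)).1
          - (PySem.List.slice (seg.foldl pvStepB (total, negs)).2 none (some (K - i - j))).sum
        = (V.take i.toNat ++ V.drop ns.toNat).sum
          - (PySem.List.slice (PySem.List.sorted (pvFneg (V.take i.toNat ++ V.drop ns.toNat))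
              (fun x => x) false) none (some (K - i - j))).sum := by
      rw [hSN, htn1, List.sum_append]
    -- recurse
    have hjs'' : ∀ j' ∈ js, 0 ≤ j' ∧ j' ≤ N ∧ min (N - j') L ≤ ns ∧ 0 ≤ K - i - j' := by
      intro j' hj'
      obtain ⟨h0', hN', _, hr'⟩ := hjs' j' hj'
      have hjj : j ≤ j' := hhead j' hj'
      exact ⟨h0', hN', min_le_min (by omega) (le_refl _), hr'⟩
    rw [ih _ _ _ ns hns0 hnsL hjs'' hsort' htn1 htn2perm htn2pair]
    congr 2
    simp only [hhand]
    rw [hval]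
    simp [pvFneg]

-- B's outer fold computes the spec's outer fold
lemma outerB_eq (N K : Int) (V : List Int) (i0 : Int) (h0 : 0 ≤ i0)
    (best ptotal : Int) (pnegs : List Int)
    (ht : ptotal = (V.take i0.toNat).sum)
    (hperm : pnegs.Perm (pvFneg (V.take i0.toNat)))
    (hpair : pnegs.Pairwise (· ≤ ·)) :
    ((PySem.List.pyRange i0 (min K N + 1) 1).foldl
      (fun (st : Int × Int × List Int) i =>
        let inner := (PySem.List.pyRange 0 (min K N - i + 1) 1).foldl
          (fun (s : Int × Int × List Int × Int) j =>
            let ns := if N - j > (V.length : Int) then (V.length : Int) else N - j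
            let tn := (PySem.List.pyRange ns s.2.2.2 1).foldl
              (fun tn idx => pvStepB tn (PySem.List.pyGetD V idx 0)) (s.2.1, s.2.2.1)
            (max s.1 (tn.1 - (PySem.List.slice tn.2 none (some (K - i - j))).sum), tn.1, tn.2, ns))
          (st.1, st.2.1, st.2.2, (V.length : Int))
        if i < (V.length : Int) then
          let x := PySem.List.pyGetD V i 0
          (inner.1, st.2.1 + x, if x < 0 then pvInsert x st.2.2 else st.2.2)
        else (inner.1, st.2.1, st.2.2))
      (best, ptotal, pnegs)).1
    = (PySem.List.pyRange i0 (min K N + 1) 1).foldl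
      (fun best i =>
        (PySem.List.pyRange 0 (min K N - i + 1) 1).foldl
          (fun best j =>
            let hand := PySem.List.slice V none (some i) ++ PySem.List.slice V (some (N - j)) none
            let negs := PySem.List.sorted (hand.filter (fun x => decide (x < 0))) (fun x => x) false
            max best (hand.sum - (PySem.List.slice negs none (some (K - i - j))).sum))
          best) best := by
  by_cases hdone : min K N + 1 ≤ i0
  · rw [PySem.List.pyRange_one_eq_nil hdone]; rfl
  · push_neg at hdone
    have hn : ∃ n : Nat, (min K N + 1 - i0).toNat = n := ⟨_, rfl⟩
    obtain ⟨n, hn⟩ := hn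
    induction n generalizing i0 best ptotal pnegs with
    | zero => omega
    | succ n ih =>
      rw [PySem.List.pyRange_one_cons hdone]
      simp only [List.foldl_cons]
      have hinner := innerB_eq N K V i0 h0
        (PySem.List.pyRange 0 (min K N - i0 + 1) 1) best ptotal pnegs (V.length : Int)
        (by positivity) (le_refl _)
        (fun j hj => by
          have := (PySem.List.mem_pyRange_one).mp hj
          exact ⟨this.1, by omega, min_le_right _ _, by omega⟩)
        ((PySem.List.pairwise_lt_pyRange_one 0 (min K N - i0 + 1)).imp le_of_lt)
        (by simp [ht])
        (by simpa [pvFneg] using hperm)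
        hpair
      -- invariant for the next prefix
      by_cases hiL : i0 < (V.length : Int)
      · rw [if_pos hiL]
        have hi0V : i0.toNat < V.length := by omega
        have hi0' : i0 = ((i0.toNat : Nat) : Int) := by omega
        have hget : PySem.List.pyGetD V i0 0 = V[i0.toNat] := by
          conv_lhs => rw [hi0']
          rw [PySem.List.pyGetD_natCast, List.getD_eq_getElem?_getD,
            List.getElem?_eq_getElem hi0V]
          rfl
        have htake1 : V.take (i0 + 1).toNat = V.take i0.toNat ++ [V[i0.toNat]] := by
          have : (i0 + 1).toNat = i0.toNat + 1 := by omega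
          rw [this, List.take_add_one, List.getElem?_eq_getElem hi0V]
          rfl
        have hpt : ptotal + PySem.List.pyGetD V i0 0 = (V.take (i0 + 1).toNat).sum := by
          rw [hget, htake1, List.sum_append, ht]; simp
        have hpn : (if PySem.List.pyGetD V i0 0 < 0
              then pvInsert (PySem.List.pyGetD V i0 0) pnegs else pnegs).Perm
            (pvFneg (V.take (i0 + 1).toNat)) := by
          rw [hget, htake1]
          by_cases hneg : V[i0.toNat] < 0
          · rw [if_pos hneg]
            rw [pvFneg_append, pvFneg_singleton_neg _ hneg]
            refine (pvInsert_perm _ _).trans ((hperm.cons _).trans ?_)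
            exact List.perm_append_comm (l₁ := [V[i0.toNat]]) (l₂ := pvFneg (V.take i0.toNat))
          · rw [if_neg hneg]
            rw [pvFneg_append, pvFneg_singleton_nonneg _ hneg, List.append_nil]
            exact hperm
        have hpp : (if PySem.List.pyGetD V i0 0 < 0
              then pvInsert (PySem.List.pyGetD V i0 0) pnegs else pnegs).Pairwise (· ≤ ·) := by
          by_cases hneg : PySem.List.pyGetD V i0 0 < 0
          · rw [if_pos hneg]; exact pvInsert_pairwise _ _ hpair
          · rw [if_neg hneg]; exact hpair
        by_cases hrec : min K N + 1 ≤ i0 + 1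
        · rw [PySem.List.pyRange_one_eq_nil hrec]
          simpa using hinner
        · push_neg at hrec
          rw [ih (i0 + 1) (by omega) _ _ _ hpt hpn hpp hrec (by omega)]
          rw [hinner]
      · rw [if_neg hiL]
        have htakeV : V.take (i0 + 1).toNat = V.take i0.toNat := by
          rw [List.take_of_length_le (by omega), List.take_of_length_le (by omega)]
        by_cases hrec : min K N + 1 ≤ i0 + 1
        · rw [PySem.List.pyRange_one_eq_nil hrec]
          simpa using hinner
        · push_neg at hrec
          rw [ih (i0 + 1) (by omega) _ ptotal pnegs
            (by rw [htakeV]; exact ht) (by rw [htakeV]; exact hperm) hpair hrec (by omega)]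
          rw [hinner]

theorem spec_eq_alt (N K : Int) (V : List Int) :
    pvSpecFold N K V = max_jewel_value_alt N K V := by
  rw [pvSpecFold, max_jewel_value_alt]
  exact (outerB_eq N K V 0 (le_refl _) 0 0 [] (by simp) (by simp [pvFneg]) (by simp)).symm

-- ===== VERDICT (by name: the statement is the Claim_ definition above) =====
theorem max_jewel_value_spec : Claim_equal_max_jewel_value := by
  intro N K V _
  unfold Spec_max_jewel_value
  rw [max_jewel_value_eq_spec, spec_eq_alt]
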